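-- pv_equiv track=rewrite | github.com/LinfanS/court-transcripts-pipeline | pipeline/send_emails.py | rename_courts
-- ===== SOURCE A (Python) =====
-- def rename_courts(courts: list[str]) -> list[str]:
--     """
--     Renames the courts to match the topic names on AWS SNS
--     """
--     topic_names = []
--     for court in courts:
--         name = ""
--         name_parts = court.split(" ")
--         new_name = "-".join(name_parts)
--         for letter in new_name:
--             if letter.isalpha() or letter == "-":
--                 name += letter
--         topic_names.append(f"c12-courts-{name}")
--     return topic_names
-- ===== SOURCE B (Python) =====
-- def rename_courts(courts: list[str]) -> list[str]:
--     """
--     Renames the courts to match the topic names on AWS SNS.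
--     Single character pass per court: keep letters and dashes, turn spaces
--     into dashes, drop everything else.
--     """
--     return [
--         "c12-courts-"
--         + "".join("-" if c == " " else c for c in court
--                   if c.isalpha() or c == "-" or c == " ")
--         for court in courts
--     ]
-- ===== Notes on version B (the rewrite author's own statement) =====
-- stated objective: simpler
-- what changed: Replaces A's split-on-space / join-with-dash / second filtering loop with one single-pass list comprehension per court that keeps letters and dashes and maps spaces to dashes, with no intermediate split list or join.
import Mathlib
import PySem

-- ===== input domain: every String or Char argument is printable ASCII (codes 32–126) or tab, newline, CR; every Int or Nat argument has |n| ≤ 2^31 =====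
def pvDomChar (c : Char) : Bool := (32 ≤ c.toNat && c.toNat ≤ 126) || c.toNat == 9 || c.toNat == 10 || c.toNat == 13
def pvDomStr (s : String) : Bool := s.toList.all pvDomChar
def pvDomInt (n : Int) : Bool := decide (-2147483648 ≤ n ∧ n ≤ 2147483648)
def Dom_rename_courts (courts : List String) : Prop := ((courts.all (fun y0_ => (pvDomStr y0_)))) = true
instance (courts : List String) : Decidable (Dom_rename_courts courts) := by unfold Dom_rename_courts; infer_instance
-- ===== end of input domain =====

-- B fuses A's split-on-space / join-with-dash / filter loop into one single-pass
-- character scan per court (simpler; same asymptotic cost).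


-- ===== PORT A =====
def rename_courts (courts : List String) : List String :=
  courts.foldl (fun topic_names court =>
    let name_parts := PySem.Chars.splitOn court.toList [' ']
    let new_name := PySem.Chars.join ['-'] name_parts
    let name := new_name.foldl
      (fun name letter =>
        if PySem.Chars.isalpha letter || letter == '-' then name ++ [letter] else name)
      ([] : List Char)
    topic_names ++ [String.ofList ("c12-courts-".toList ++ name)]) []

-- ===== PORT B =====
def rename_courts_alt (courts : List String) : List String :=
  courts.map (fun court =>
    String.ofList ("c12-courts-".toList ++
      court.toList.filterMap (fun c =>
        if PySem.Chars.isalpha c || c == '-' || c == ' ' then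
          some (if c == ' ' then '-' else c)
        else none)))

-- ===== PRECONDITION & SPEC =====
def Spec_rename_courts (courts : List String) (out : List String) : Prop := out = rename_courts_alt courts
instance (courts : List String) (out : List String) : Decidable (Spec_rename_courts courts out) := by unfold Spec_rename_courts; infer_instance

-- ===== CLAIM (what is proved, stated in full; the proofs are below) =====
def Claim_equal_rename_courts : Prop := ∀ (courts : List String), Dom_rename_courts courts → Spec_rename_courts courts (rename_courts courts)

-- ===== LEMMAS AND PROOFS =====

/-- Specification of splitting on a single char, piece-by-piece. -/
def splitSpec (p : List Char) : List Char → List (List Char)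
  | [] => [p]
  | c :: rest => if c = ' ' then p :: splitSpec [] rest else splitSpec (p ++ [c]) rest

theorem splitSpec_ne_nil (l : List Char) (p : List Char) : splitSpec p l ≠ [] := by
  induction l generalizing p with
  | nil => simp [splitSpec]
  | cons c r ih => by_cases h : c = ' ' <;> simp [splitSpec, h, ih]

theorem splitOn_go_eq (fuel : Nat) (l cur : List Char) (acc : List (List Char))
    (h : l.length < fuel) :
    PySem.Chars.splitOn.go [' '] fuel l cur acc = acc.reverse ++ splitSpec cur.reverse l := by
  induction fuel generalizing l cur acc with
  | zero => omega
  | succ fuel ih =>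
    cases l with
    | nil => simp [PySem.Chars.splitOn.go, splitSpec]
    | cons c rest =>
      by_cases hc : c = ' '
      · subst hc
        rw [show PySem.Chars.splitOn.go [' '] (fuel+1) (' ' :: rest) cur acc
              = PySem.Chars.splitOn.go [' '] fuel rest [] (cur.reverse :: acc) by
              simp [PySem.Chars.splitOn.go, List.isPrefixOf]]
        rw [ih rest [] (cur.reverse :: acc) (by simpa using Nat.lt_of_succ_lt_succ h)]
        simp [splitSpec]
      · rw [show PySem.Chars.splitOn.go [' '] (fuel+1) (c :: rest) cur acc
              = PySem.Chars.splitOn.go [' '] fuel rest (c :: cur) acc by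
              simp [PySem.Chars.splitOn.go, List.isPrefixOf]
              intro h; exact absurd h.symm hc]
        rw [ih rest (c :: cur) acc (by simpa using Nat.lt_of_succ_lt_succ h)]
        simp [splitSpec, hc]

theorem splitOn_eq_splitSpec (s : List Char) :
    PySem.Chars.splitOn s [' '] = splitSpec [] s := by
  unfold PySem.Chars.splitOn
  rw [splitOn_go_eq (s.length + 1) s [] [] (by omega)]
  simp

/-- Joining the split pieces with '-' just replaces spaces by dashes. -/
theorem join_splitSpec (l : List Char) (p : List Char) :
    PySem.Chars.join ['-'] (splitSpec p l) = p ++ l.map (fun c => if c = ' ' then '-' else c) := by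
  induction l generalizing p with
  | nil => simp [splitSpec, PySem.Chars.join_singleton]
  | cons c rest ih =>
    by_cases hc : c = ' '
    · subst hc
      obtain ⟨q, qs, hq⟩ := List.exists_cons_of_ne_nil (splitSpec_ne_nil rest [])
      rw [show splitSpec p (' ' :: rest) = p :: splitSpec [] rest by simp [splitSpec], hq,
          PySem.Chars.join_cons_cons, ← hq, ih]
      simp
    · simp only [splitSpec, if_neg hc]
      rw [ih]
      simp [hc]

/-- A's character-accumulating loop is a filter. -/
theorem foldl_filter (l : List Char) (acc : List Char) (pred : Char → Bool) :
    l.foldl (fun n c => if pred c then n ++ [c] else n) acc = acc ++ l.filter pred := by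
  induction l generalizing acc with
  | nil => simp
  | cons c rest ih =>
    by_cases h : pred c <;> simp [List.foldl, h, ih]

theorem perString (court : List Char) :
    List.foldl
      (fun name letter =>
        if PySem.Chars.isalpha letter || letter == '-' then name ++ [letter] else name)
      ([] : List Char)
      (PySem.Chars.join ['-'] (PySem.Chars.splitOn court [' '])) =
    court.filterMap (fun c =>
      if PySem.Chars.isalpha c || c == '-' || c == ' ' then
        some (if c == ' ' then '-' else c)
      else none) := by
  rw [splitOn_eq_splitSpec, join_splitSpec,
      foldl_filter _ [] (fun letter => PySem.Chars.isalpha letter || letter == '-')]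
  induction court with
  | nil => simp
  | cons c rest ih =>
    by_cases hsp : c = ' '
    · subst hsp
      simpa [List.filter_cons, PySem.Chars.isalpha] using ih
    · by_cases ha : PySem.Chars.isalpha c
      · simpa [List.filter_cons, hsp, ha] using ih
      · by_cases hd : c = '-'
        · subst hd
          simpa [List.filter_cons, ha] using ih
        · simpa [List.filter_cons, hsp, ha, hd] using ih

-- ===== VERDICT (by name: the statement is the Claim_ definition above) =====
theorem foldl_append_map {α β : Type} (g : α → β) (l : List α) (acc : List β) :
    l.foldl (fun a x => a ++ [g x]) acc = acc ++ l.map g := by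
  induction l generalizing acc with
  | nil => simp
  | cons c rest ih => simp [List.foldl, ih]

theorem ports_eq (courts : List String) : rename_courts courts = rename_courts_alt courts := by
  show List.foldl
      (fun topic_names court =>
        topic_names ++
          [String.ofList ("c12-courts-".toList ++
            List.foldl
              (fun name letter =>
                if PySem.Chars.isalpha letter || letter == '-' then name ++ [letter] else name)
              [] (PySem.Chars.join ['-'] (PySem.Chars.splitOn court.toList [' '])))])
      [] courts = rename_courts_alt courts
  rw [foldl_append_map]
  unfold rename_courts_alt
  simp only [List.nil_append, perString]

theorem rename_courts_spec : Claim_equal_rename_courts :=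
  fun courts _ => ports_eq courts
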